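-- pv_equiv track=rewrite | github.com/johnnyw66/picoflipperzero | tools/analyse.py | clean_timings
-- ===== SOURCE A (Python) =====
-- def clean_timings(timings, tolerance=200):
--     cleaned_timings = []
--     for time in timings:
--         if 400 <= time <= 600:
--             cleaned_timings.append(500)
--         elif 1400 <= time <= 1600:
--             cleaned_timings.append(1500)
--         elif 3800 <= time <= 4200:
--             cleaned_timings.append(4000)
--         else:
--             cleaned_timings.append(None)  # Mark unexpected values for filtering
--     return cleaned_timings
-- ===== SOURCE B (Python) =====
-- def _snap(t):
--     # nearest bucket center by absolute distance, then radius check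
--     c, r = min(((500, 100), (1500, 100), (4000, 200)), key=lambda cr: abs(t - cr[0]))
--     return c if abs(t - c) <= r else None
--
-- def clean_timings(timings, tolerance=200):
--     return [_snap(t) for t in timings]
-- ===== Notes on version B (the rewrite author's own statement) =====
-- stated objective: alternative
-- what changed: Instead of testing three hard-coded intervals in an if/elif chain, B snaps each timing to the nearest bucket center by minimizing absolute distance (min with key) and then checks it lies within that bucket's radius; correct because the intervals are exactly center-plus/minus-radius and far apart, so any in-interval value's nearest center is its own bucket's.
import Mathlib
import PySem

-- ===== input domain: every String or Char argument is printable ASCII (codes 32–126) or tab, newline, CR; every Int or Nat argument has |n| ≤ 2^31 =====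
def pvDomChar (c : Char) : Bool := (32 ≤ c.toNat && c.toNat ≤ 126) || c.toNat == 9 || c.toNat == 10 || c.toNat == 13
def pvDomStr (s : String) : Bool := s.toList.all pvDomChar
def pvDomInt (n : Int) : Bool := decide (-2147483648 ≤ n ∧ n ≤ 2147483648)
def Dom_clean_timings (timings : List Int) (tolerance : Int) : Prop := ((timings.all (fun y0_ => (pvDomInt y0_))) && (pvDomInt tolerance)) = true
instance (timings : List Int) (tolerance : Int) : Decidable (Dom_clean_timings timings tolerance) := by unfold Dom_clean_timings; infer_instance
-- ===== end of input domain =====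

-- B replaces A's if/elif interval chain with nearest-center snapping: minimize |t - center| over the bucket centers, then check the radius (alternative decomposition, same cost).

-- ===== PORT A =====
def clean_timings (timings : List Int) (tolerance : Int) : List (Option Int) :=
  timings.foldl (fun cleaned_timings time =>
    if 400 ≤ time ∧ time ≤ 600 then
      cleaned_timings ++ [some 500]
    else if 1400 ≤ time ∧ time ≤ 1600 then
      cleaned_timings ++ [some 1500]
    else if 3800 ≤ time ∧ time ≤ 4200 then
      cleaned_timings ++ [some 4000]
    else
      cleaned_timings ++ [none]) []

-- ===== PORT B =====
-- nearest bucket center by absolute distance (Python min with key), then radius check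
def pvSnap (t : Int) : Option Int :=
  match PySem.List.min? [((500 : Int), (100 : Int)), (1500, 100), (4000, 200)]
      (fun cr => |t - cr.1|) with
  | some (c, r) => if |t - c| ≤ r then some c else none
  | none => none  -- unreachable: the literal center list is nonempty

def clean_timings_alt (timings : List Int) (tolerance : Int) : List (Option Int) :=
  timings.map pvSnap

-- ===== PRECONDITION & SPEC =====
def Spec_clean_timings (timings : List Int) (tolerance : Int) (out : List (Option Int)) : Prop := out = clean_timings_alt timings tolerance
instance (timings : List Int) (tolerance : Int) (out : List (Option Int)) : Decidable (Spec_clean_timings timings tolerance out) := by unfold Spec_clean_timings; infer_instance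

-- ===== CLAIM =====
def Claim_equal_clean_timings : Prop := ∀ (timings : List Int) (tolerance : Int), Dom_clean_timings timings tolerance → Spec_clean_timings timings tolerance (clean_timings timings tolerance)

-- ===== LEMMAS AND PROOFS =====
theorem step_eq_snap (t : Int) :
    (if 400 ≤ t ∧ t ≤ 600 then some (500 : Int)
     else if 1400 ≤ t ∧ t ≤ 1600 then some 1500
     else if 3800 ≤ t ∧ t ≤ 4200 then some 4000
     else none) = pvSnap t := by
  simp only [pvSnap, PySem.List.min?, List.foldl, Int.abs_eq_natAbs]
  split_ifs <;> simp only [Int.abs_eq_natAbs] at * <;>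
  (try split_ifs <;> simp only [Int.abs_eq_natAbs] at *) <;>
  (try split_ifs <;> simp only [Int.abs_eq_natAbs] at *) <;>
  first | rfl | omega

theorem fold_eq_map (timings : List Int) (acc : List (Option Int)) :
    timings.foldl (fun cleaned_timings time =>
      if 400 ≤ time ∧ time ≤ 600 then cleaned_timings ++ [some 500]
      else if 1400 ≤ time ∧ time ≤ 1600 then cleaned_timings ++ [some 1500]
      else if 3800 ≤ time ∧ time ≤ 4200 then cleaned_timings ++ [some 4000]
      else cleaned_timings ++ [none]) acc
    = acc ++ timings.map pvSnap := by
  induction timings generalizing acc with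
  | nil => simp
  | cons t ts ih =>
    simp only [List.foldl, List.map]
    rw [show (if 400 ≤ t ∧ t ≤ 600 then acc ++ [some (500:Int)]
      else if 1400 ≤ t ∧ t ≤ 1600 then acc ++ [some 1500]
      else if 3800 ≤ t ∧ t ≤ 4200 then acc ++ [some 4000]
      else acc ++ [none]) = acc ++ [pvSnap t] from by
        rw [← step_eq_snap t]; split_ifs <;> rfl]
    rw [ih]; simp

-- ===== VERDICT =====
theorem clean_timings_spec : Claim_equal_clean_timings := by
  intro timings tolerance _
  unfold Spec_clean_timings clean_timings clean_timings_alt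
  exact fold_eq_map timings []
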